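-- pv_equiv track=rewrite | github.com/AndyDAvies86/advent_of_code | advent_of_code/2024/Day03/Solution.py | p2parse
-- ===== SOURCE A (Python) =====
-- import copy
--
-- def p2parse(inputlist):
--     full = ''.join(inputlist)
--     rem = copy.deepcopy(full)
--     # ind = 1
--     cleaned = ''
--     while len(rem) > 0:
--         pos = rem.find("don't()")
--         if pos == -1:
--             cleaned = cleaned + rem
--         else:
--             cleaned = cleaned + rem[:pos]
--         rem = rem[pos:]
--         posb = rem.find("do()")
--         if posb == -1:
--             rem = ''
--         else:
--             rem = rem[posb:]
--     return cleaned
-- ===== SOURCE B (Python) =====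
-- def p2parse(inputlist):
--     # Single linear pass with an enabled/disabled flag; return value only.
--     s = ''.join(inputlist)
--     out = []
--     i = 0
--     enabled = True
--     n = len(s)
--     while i < n:
--         if enabled:
--             if s.startswith("don't()", i):
--                 i += 7
--                 enabled = False
--             else:
--                 out.append(s[i])
--                 i += 1
--         else:
--             if s.startswith("do()", i):
--                 out.append("do()")
--                 i += 4
--                 enabled = True
--             else:
--                 i += 1
--     return ''.join(out)
-- ===== Notes on version B (the rewrite author's own statement) =====
-- stated objective: faster
-- what changed: A repeatedly re-scans the whole remaining text with find("don't()")/find("do()") and rebuilds it by slicing; B makes a single left-to-right pass over the joined string with an index and an enabled/disabled flag, appending characters while enabled and skipping to the next do() while disabled.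
import Mathlib
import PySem

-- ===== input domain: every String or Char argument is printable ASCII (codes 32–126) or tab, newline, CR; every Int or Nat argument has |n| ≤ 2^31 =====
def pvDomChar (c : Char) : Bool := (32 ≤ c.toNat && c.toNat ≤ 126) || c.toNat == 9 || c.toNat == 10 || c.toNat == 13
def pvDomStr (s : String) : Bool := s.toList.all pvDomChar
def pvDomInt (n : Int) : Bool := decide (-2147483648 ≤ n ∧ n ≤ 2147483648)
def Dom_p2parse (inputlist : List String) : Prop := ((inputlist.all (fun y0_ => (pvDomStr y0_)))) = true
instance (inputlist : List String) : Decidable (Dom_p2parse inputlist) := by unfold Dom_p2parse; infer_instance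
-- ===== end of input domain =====

-- B replaces A's repeated find/slice passes over the remaining text by one left-to-right pass
-- with an enabled/disabled flag (return value only; neither version mutates its argument).

-- ===== PORT A =====
-- A's while loop over (cleaned, rem); the fuel argument (rem.length + 1) is a totalization
-- guard only: every iteration either empties rem or strictly shortens it.
def p2parseLoop (fuel : Nat) (cleaned rem : List Char) : List Char :=
  match fuel with
  | 0 => cleaned
  | fuel + 1 =>
    if 0 < rem.length then
      let pos := PySem.Chars.find rem "don't()".toList
      let cleaned' := if pos = -1 then cleaned ++ rem
                      else cleaned ++ PySem.List.slice rem none (some pos)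
      let rem1 := PySem.List.slice rem (some pos) none
      let posb := PySem.Chars.find rem1 "do()".toList
      let rem2 := if posb = -1 then ([] : List Char)
                  else PySem.List.slice rem1 (some posb) none
      p2parseLoop fuel cleaned' rem2
    else cleaned


def p2parse (inputlist : List String) : String :=
  -- full = ''.join(inputlist); copy.deepcopy(full) is the identity on an immutable string
  String.ofList (p2parseLoop ((PySem.Str.join "" inputlist).toList.length + 1) []
    (PySem.Str.join "" inputlist).toList)

-- ===== PORT B =====
-- Source B's index loop: i runs over the joined string, `enabled` toggles at the markers;
-- s.startswith(pat, i) is ported as PySem.Chars.startswith (s.drop i) pat (exact).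
def p2parseAltLoop (s : List Char) (i : Nat) (enabled : Bool) (out : List Char) : List Char :=
  if h : i < s.length then
    if enabled then
      if PySem.Chars.startswith (s.drop i) "don't()".toList then
        p2parseAltLoop s (i + 7) false out
      else
        p2parseAltLoop s (i + 1) true (out ++ [s[i]])
    else
      if PySem.Chars.startswith (s.drop i) "do()".toList then
        p2parseAltLoop s (i + 4) true (out ++ "do()".toList)
      else
        p2parseAltLoop s (i + 1) false out
  else out
termination_by s.length - i
decreasing_by all_goals omega


def p2parse_alt (inputlist : List String) : String :=
  String.ofList (p2parseAltLoop (PySem.Str.join "" inputlist).toList 0 true [])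

-- ===== PRECONDITION & SPEC =====
def Spec_p2parse (inputlist : List String) (out : String) : Prop := out = p2parse_alt inputlist
instance (inputlist : List String) (out : String) : Decidable (Spec_p2parse inputlist out) := by unfold Spec_p2parse; infer_instance

-- ===== CLAIM (what is proved, stated in full; the proofs are below) =====
def Claim_equal_p2parse : Prop := ∀ (inputlist : List String), Dom_p2parse inputlist → Spec_p2parse inputlist (p2parse inputlist)

-- ===== LEMMAS AND PROOFS =====

-- The functional core both loops compute: scan left to right, toggling at the markers.
def pvScan (enabled : Bool) (t : List Char) : List Char :=
  if enabled then
    if h : "don't()".toList <+: t then pvScan false (t.drop 7)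
    else match t with
      | [] => []
      | c :: cs => c :: pvScan true cs
  else
    if h : "do()".toList <+: t then "do()".toList ++ pvScan true (t.drop 4)
    else match t with
      | [] => []
      | _ :: cs => pvScan false cs
termination_by t.length
decreasing_by
  · have := h.length_le; simp at this ⊢; omega
  · simp
  · have := h.length_le; simp at this ⊢; omega
  · simp

lemma pvScan_nil (e : Bool) : pvScan e [] = [] := by
  rw [pvScan]; cases e <;> simp

lemma pvScan_true_of_no_D (u : List Char) (h : ¬ "don't()".toList <:+: u) :
    pvScan true u = u := by
  induction u with
  | nil => exact pvScan_nil true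
  | cons c cs ih =>
    rw [pvScan]
    have h0 : ¬ "don't()".toList <+: (c :: cs) := fun hp => h hp.isInfix
    simp only [if_true, dif_neg h0]
    rw [ih (fun hi => h (List.infix_cons hi))]

lemma pvScan_false_of_no_G (u : List Char) (h : ¬ "do()".toList <:+: u) :
    pvScan false u = [] := by
  induction u with
  | nil => exact pvScan_nil false
  | cons c cs ih =>
    rw [pvScan]
    have h0 : ¬ "do()".toList <+: (c :: cs) := fun hp => h hp.isInfix
    simp only [Bool.false_eq_true, if_false, dif_neg h0]
    exact ih (fun hi => h (List.infix_cons hi))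

lemma pvScan_true_skip (p : Nat) (u : List Char) (hp : p ≤ u.length)
    (h : ∀ i < p, ¬ "don't()".toList <+: u.drop i) :
    pvScan true u = u.take p ++ pvScan true (u.drop p) := by
  induction p generalizing u with
  | zero => simp
  | succ p ih =>
    cases u with
    | nil => simp at hp
    | cons c cs =>
      rw [pvScan]
      have h0 : ¬ "don't()".toList <+: (c :: cs) := by simpa using h 0 (by omega)
      simp only [if_true, dif_neg h0]
      rw [ih cs (by simpa using hp) (fun i hi => by simpa using h (i + 1) (by omega))]
      simp

lemma pvScan_false_skip (p : Nat) (u : List Char) (hp : p ≤ u.length)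
    (h : ∀ i < p, ¬ "do()".toList <+: u.drop i) :
    pvScan false u = pvScan false (u.drop p) := by
  induction p generalizing u with
  | zero => simp
  | succ p ih =>
    cases u with
    | nil => simp at hp
    | cons c cs =>
      rw [pvScan]
      have h0 : ¬ "do()".toList <+: (c :: cs) := by simpa using h 0 (by omega)
      simp only [Bool.false_eq_true, if_false, dif_neg h0]
      exact ih cs (by simpa using hp) (fun i hi => by simpa using h (i + 1) (by omega))


lemma pvScan_true_at_D (u : List Char) (h : "don't()".toList <+: u) :
    pvScan true u = pvScan false (u.drop 7) := by
  rw [pvScan]; simp only [if_true, dif_pos h]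

lemma pvScan_false_at_G (u : List Char) (h : "do()".toList <+: u) :
    pvScan false u = "do()".toList ++ pvScan true (u.drop 4) := by
  rw [pvScan]; simp only [Bool.false_eq_true, if_false, dif_pos h]

lemma no_G_in_D_prefix (w : List Char) (j : Nat) (hj : j < 7) :
    ¬ "do()".toList <+: ("don't()".toList ++ w).drop j := by
  intro h
  rw [show "don't()".toList = ['d','o','n','\'','t','(',')'] from rfl] at h
  rw [show "do()".toList = ['d','o','(',')'] from rfl] at h
  interval_cases j <;> simp [List.cons_prefix_cons] at h

lemma no_D_in_G_prefix (w : List Char) (j : Nat) (hj : j < 4) :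
    ¬ "don't()".toList <+: ("do()".toList ++ w).drop j := by
  intro h
  rw [show "don't()".toList = ['d','o','n','\'','t','(',')'] from rfl] at h
  rw [show "do()".toList = ['d','o','(',')'] from rfl] at h
  interval_cases j <;> simp [List.cons_prefix_cons] at h


lemma loopA_eq_scan (fuel : Nat) :
    ∀ (rem cleaned : List Char), rem.length < fuel →
      p2parseLoop fuel cleaned rem = cleaned ++ pvScan true rem := by
  induction fuel with
  | zero => intro rem cleaned h; omega
  | succ fuel ih =>
    intro rem cleaned hlen
    rw [p2parseLoop]
    by_cases hne : 0 < rem.length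
    swap
    · have : rem = [] := by cases rem <;> simp_all
      simp [this, pvScan_nil]
    simp only [if_pos hne]
    by_cases hpos : PySem.Chars.find rem "don't()".toList = -1
    · -- no "don't()" : append all of rem, rem becomes its last char, then empty
      have hnoD : ¬ "don't()".toList <:+: rem := (PySem.Chars.find_eq_neg_one_iff rem _).mp hpos
      simp only [hpos, if_true]
      rw [PySem.List.slice_from_neg_one]
      have hlen1 : (rem.drop (rem.length - 1)).length = 1 := by
        simp [List.length_drop]; omega
      have hposb : PySem.Chars.find (rem.drop (rem.length - 1)) "do()".toList = -1 := by
        rw [PySem.Chars.find_eq_neg_one_iff]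
        intro hinf
        have := hinf.length_le
        rw [hlen1] at this
        simp at this
      simp only [hposb, if_true]
      rw [ih [] (cleaned ++ rem) (by simp; omega)]
      rw [pvScan_nil, pvScan_true_of_no_D rem hnoD]
      simp
    · -- "don't()" found at pos ≥ 0
      have hge : 0 ≤ PySem.Chars.find rem "don't()".toList := by
        have := PySem.Chars.neg_one_le_find rem "don't()".toList; omega
      obtain ⟨hpre, hmin⟩ := PySem.Chars.find_spec hge
      set p := (PySem.Chars.find rem "don't()".toList).toNat with hp
      have hple : p ≤ rem.length := by
        have := PySem.Chars.find_le_length rem "don't()".toList; omega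
      simp only [if_neg hpos]
      rw [PySem.List.slice_to rem hge, PySem.List.slice_from rem hge]
      rw [← hp]
      obtain ⟨w, hw⟩ := hpre
      have hD : "don't()".toList <+: rem.drop p := ⟨w, hw⟩
      by_cases hposb : PySem.Chars.find (rem.drop p) "do()".toList = -1
      · -- no "do()": rem2 = [], output is cleaned ++ rem.take p
        have hnoG : ¬ "do()".toList <:+: rem.drop p :=
          (PySem.Chars.find_eq_neg_one_iff _ _).mp hposb
        simp only [hposb, if_true]
        rw [ih [] _ (by simp; omega), pvScan_nil]
        rw [pvScan_true_skip p rem hple hmin, pvScan_true_at_D _ hD]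
        rw [pvScan_false_of_no_G]
        · simp
        · intro hinf
          exact hnoG (hinf.trans (List.drop_suffix 7 (rem.drop p)).isInfix)
      · have hgeb : 0 ≤ PySem.Chars.find (rem.drop p) "do()".toList := by
          have := PySem.Chars.neg_one_le_find (rem.drop p) "do()".toList; omega
        obtain ⟨hqpre, hqmin⟩ := PySem.Chars.find_spec hgeb
        set q := (PySem.Chars.find (rem.drop p) "do()".toList).toNat with hq
        have h7q : 7 ≤ q := by
          by_contra hlt
          exact no_G_in_D_prefix w q (by omega) (by rw [hw]; exact hqpre)
        have hqlt : q < (rem.drop p).length := by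
          by_contra hge'
          have : (rem.drop p).drop q = [] := List.drop_eq_nil_of_le (by omega)
          rw [this] at hqpre
          have := hqpre.length_le; simp at this
        simp only [if_neg hposb]
        rw [PySem.List.slice_from _ hgeb, ← hq]
        have e1 : ((rem.drop p).drop q).length = (rem.drop p).length - q := List.length_drop ..
        have e2 : (rem.drop p).length = rem.length - p := List.length_drop ..
        rw [ih _ _ (by omega)]
        -- right side: walk to p enabled, jump 7, skip to q disabled, re-enable at "do()"
        have hR : pvScan true rem
            = List.take p rem ++ pvScan true ((rem.drop p).drop q) := by
          rw [pvScan_true_skip p rem hple hmin, pvScan_true_at_D _ hD]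
          rw [pvScan_false_skip (q - 7) ((rem.drop p).drop 7)
              (by rw [List.drop_drop, List.length_drop]; omega)
              (fun i hi => by
                rw [List.drop_drop]
                exact hqmin (7 + i) (by omega))]
          rw [List.drop_drop, Nat.add_sub_cancel' h7q]
          obtain ⟨w2, hw2⟩ := hqpre
          rw [pvScan_false_at_G _ ⟨w2, hw2⟩]
          rw [pvScan_true_skip 4 ((rem.drop p).drop q)
              (by have := congrArg List.length hw2; simp at this; omega)
              (fun i hi => by rw [← hw2]; exact no_D_in_G_prefix w2 i hi)]
          have ht4 : List.take 4 ((rem.drop p).drop q) = "do()".toList := by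
            rw [← hw2]
            rw [List.take_append_of_le_length (by simp)]
            simp
          rw [ht4]
        rw [hR]
        simp

lemma pvScan_true_cons (c : Char) (cs : List Char) (h : ¬ "don't()".toList <+: c :: cs) :
    pvScan true (c :: cs) = c :: pvScan true cs := by
  rw [pvScan]; simp only [if_true, dif_neg h]

lemma pvScan_false_cons (c : Char) (cs : List Char) (h : ¬ "do()".toList <+: c :: cs) :
    pvScan false (c :: cs) = pvScan false cs := by
  rw [pvScan]; simp only [Bool.false_eq_true, if_false, dif_neg h]

lemma loopB_eq_scan (k : Nat) :
    ∀ (s : List Char) (i : Nat) (enabled : Bool) (out : List Char),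
      s.length - i ≤ k →
      p2parseAltLoop s i enabled out = out ++ pvScan enabled (s.drop i) := by
  induction k with
  | zero =>
    intro s i enabled out hk
    rw [p2parseAltLoop, dif_neg (by omega), List.drop_eq_nil_of_le (by omega), pvScan_nil]
    simp
  | succ k ih =>
    intro s i enabled out hk
    rw [p2parseAltLoop]
    by_cases h : i < s.length
    swap
    · rw [dif_neg h, List.drop_eq_nil_of_le (by omega), pvScan_nil]; simp
    rw [dif_pos h]
    have hd := List.drop_eq_getElem_cons h
    cases enabled with
    | true =>
      by_cases hsw : PySem.Chars.startswith (s.drop i) "don't()".toList = true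
      · rw [if_pos rfl, if_pos hsw, ih s (i + 7) false out (by omega)]
        rw [pvScan_true_at_D _ ((PySem.Chars.startswith_iff _ _).mp hsw), List.drop_drop]
      · rw [if_pos rfl, if_neg hsw, ih s (i + 1) true (out ++ [s[i]]) (by omega)]
        have hnp : ¬ "don't()".toList <+: s[i] :: s.drop (i + 1) := by
          rw [← hd]
          exact fun hp => hsw ((PySem.Chars.startswith_iff _ _).mpr hp)
        conv_rhs => rw [hd, pvScan_true_cons _ _ hnp]
        simp
    | false =>
      by_cases hsw : PySem.Chars.startswith (s.drop i) "do()".toList = true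
      · rw [if_neg (by simp), if_pos hsw, ih s (i + 4) true (out ++ "do()".toList) (by omega)]
        rw [pvScan_false_at_G _ ((PySem.Chars.startswith_iff _ _).mp hsw), List.drop_drop]
        simp
      · rw [if_neg (by simp), if_neg hsw, ih s (i + 1) false out (by omega)]
        have hnp : ¬ "do()".toList <+: s[i] :: s.drop (i + 1) := by
          rw [← hd]
          exact fun hp => hsw ((PySem.Chars.startswith_iff _ _).mpr hp)
        conv_rhs => rw [hd, pvScan_false_cons _ _ hnp]


-- ===== VERDICT (by name: the statement is the Claim_ definition above) =====
theorem p2parse_spec : Claim_equal_p2parse := by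
  intro inputlist _
  unfold Spec_p2parse p2parse p2parse_alt
  rw [loopA_eq_scan _ _ _ (by omega)]
  rw [loopB_eq_scan ((PySem.Str.join "" inputlist).toList.length) _ 0 true [] (by omega)]
  simp
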